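-- pv_equiv track=rewrite | github.com/Necryotiks/WSU-CPTS | 355/HW3.py | lookupVal2
-- ===== SOURCE A (Python) =====
-- def lookupVal2(tL,k):
--     for index,tupleDict in enumerate(reversed(tL)):
--         try:
--             return( tupleDict[1][k]) #hacky as all shit
--             return
--         except:
--             pass
--     return(None)
-- ===== SOURCE B (Python) =====
-- def lookupVal2(tL, k):
--     result = None
--     for tupleDict in tL:
--         try:
--             result = tupleDict[1][k]
--         except:
--             pass
--     return result
-- ===== Notes on version B (the rewrite author's own statement) =====
-- stated objective: simpler
-- what changed: Replaced the reversed-iteration early-return scan with a forward scan keeping a last-seen accumulator, removing reversed/enumerate and the return-from-loop control flow.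
import Mathlib
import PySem

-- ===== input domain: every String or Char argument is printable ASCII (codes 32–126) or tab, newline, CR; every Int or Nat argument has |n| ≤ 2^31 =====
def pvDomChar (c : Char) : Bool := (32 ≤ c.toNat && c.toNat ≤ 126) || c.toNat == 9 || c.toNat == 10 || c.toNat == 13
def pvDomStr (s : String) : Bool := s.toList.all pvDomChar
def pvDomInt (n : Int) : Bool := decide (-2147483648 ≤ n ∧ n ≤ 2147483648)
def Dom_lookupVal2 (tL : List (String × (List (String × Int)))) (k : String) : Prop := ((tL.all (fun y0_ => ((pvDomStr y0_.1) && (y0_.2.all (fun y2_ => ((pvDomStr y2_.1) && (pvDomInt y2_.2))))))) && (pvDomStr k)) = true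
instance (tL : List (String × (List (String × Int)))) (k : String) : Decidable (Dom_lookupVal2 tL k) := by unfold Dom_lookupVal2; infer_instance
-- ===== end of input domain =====

-- B replaces A's reversed early-return scan by a forward scan with a last-seen accumulator (simpler; return value only).

-- ===== PORT A =====
-- dict lookup tupleDict[1][k]: first match in the association list (KeyError → none, swallowed by the bare except)
def lvDictGet? (d : List (String × Int)) (k : String) : Option Int :=
  (d.find? (fun p => p.1 == k)).map (·.2)

-- the 'for … in reversed(tL): try: return …; except: pass' loop
def lvGoA (l : List (String × (List (String × Int)))) (k : String) : Option Int :=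
  match l with
  | [] => none
  | td :: rest =>
    match lvDictGet? td.2 k with
    | some v => some v
    | none => lvGoA rest k

def lookupVal2 (tL : List (String × (List (String × Int)))) (k : String) : Option Int :=
  lvGoA tL.reverse k

-- ===== PORT B =====
def lookupVal2_alt (tL : List (String × (List (String × Int)))) (k : String) : Option Int :=
  tL.foldl (fun result td =>
    match lvDictGet? td.2 k with
    | some v => some v
    | none => result) none

-- ===== PRECONDITION & SPEC =====
def Spec_lookupVal2 (tL : List (String × (List (String × Int)))) (k : String) (out : Option Int) : Prop := out = lookupVal2_alt tL k
instance (tL : List (String × (List (String × Int)))) (k : String) (out : Option Int) : Decidable (Spec_lookupVal2 tL k out) := by unfold Spec_lookupVal2; infer_instance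

-- ===== CLAIM (what is proved, stated in full; the proofs are below) =====
def Claim_equal_lookupVal2 : Prop := ∀ (tL : List (String × (List (String × Int)))) (k : String), Dom_lookupVal2 tL k → Spec_lookupVal2 tL k (lookupVal2 tL k)

-- ===== LEMMAS AND PROOFS =====

theorem lvGoA_append (a b : List (String × (List (String × Int)))) (k : String) :
    lvGoA (a ++ b) k = match lvGoA a k with
      | some v => some v
      | none => lvGoA b k := by
  induction a with
  | nil => simp [lvGoA]
  | cons x xs ih =>
    simp only [List.cons_append, lvGoA]
    cases lvDictGet? x.2 k <;> simp [ih]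

theorem foldl_eq_revScan (l : List (String × (List (String × Int)))) (k : String)
    (acc : Option Int) :
    l.foldl (fun result td =>
      match lvDictGet? td.2 k with
      | some v => some v
      | none => result) acc
      = match lvGoA l.reverse k with
        | some v => some v
        | none => acc := by
  induction l generalizing acc with
  | nil => simp [lvGoA]
  | cons x xs ih =>
    simp only [List.foldl_cons, List.reverse_cons, lvGoA_append, ih]
    cases lvGoA xs.reverse k <;> cases h : lvDictGet? x.2 k <;> simp [lvGoA, h]

-- ===== VERDICT (by name: the statement is the Claim_ definition above) =====
theorem lookupVal2_spec : Claim_equal_lookupVal2 := by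
  intro tL k _
  unfold Spec_lookupVal2 lookupVal2 lookupVal2_alt
  rw [foldl_eq_revScan]
  cases lvGoA tL.reverse k <;> rfl
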